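-- pv_equiv track=rewrite | github.com/miliar/Code_Jam_Webscraper | solutions_python/Problem_43/147.py | timebase
-- ===== SOURCE A (Python) =====
-- def timebase(input):
--     """docstring for timebase"""
--     #print input
--     i = 1
--     maps = {}
--     for j in range(len(input)):
--         if input[j] not in maps:
--             maps[input[j]] = i
--             if i == 1:
--                 i = 0
--             elif i == 0:
--                 i = 2
--             else:
--                 i += 1
--     sum = 0
--     base = len(maps.keys())
--     if base == 1:
--         base += 1
--     for j in range(len(input)):
--         sum += base ** (len(input) - j - 1) * maps[input[j]]
--     return sum
-- ===== SOURCE B (Python) =====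
-- def timebase(input):
--     # digits: dedup first (first-occurrence order), then assign codes by position
--     order = list(dict.fromkeys(input))
--     digits = {c: (1 if i == 0 else 0 if i == 1 else i) for i, c in enumerate(order)}
--     base = max(2, len(order))
--     ds = [digits[c] for c in input]
--     def ev(lo, hi):
--         # value of ds[lo:hi] in the given base, together with base**(hi-lo)
--         if hi - lo == 1:
--             return ds[lo], base
--         mid = (lo + hi) // 2
--         vl, pl = ev(lo, mid)
--         vr, pr = ev(mid, hi)
--         return vl * pr + vr, pl * pr
--     return ev(0, len(ds))[0] if ds else 0
-- ===== Notes on version B (the rewrite author's own statement) =====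
-- stated objective: faster
-- what changed: B first deduplicates the string with dict.fromkeys and assigns digit codes by enumeration (instead of a conditional loop threading a counter), then evaluates the digit string by divide-and-conquer (split in half, combine as left*base^len(right)+right) instead of summing a freshly computed power base**(n-j-1) per position.
import Mathlib
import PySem

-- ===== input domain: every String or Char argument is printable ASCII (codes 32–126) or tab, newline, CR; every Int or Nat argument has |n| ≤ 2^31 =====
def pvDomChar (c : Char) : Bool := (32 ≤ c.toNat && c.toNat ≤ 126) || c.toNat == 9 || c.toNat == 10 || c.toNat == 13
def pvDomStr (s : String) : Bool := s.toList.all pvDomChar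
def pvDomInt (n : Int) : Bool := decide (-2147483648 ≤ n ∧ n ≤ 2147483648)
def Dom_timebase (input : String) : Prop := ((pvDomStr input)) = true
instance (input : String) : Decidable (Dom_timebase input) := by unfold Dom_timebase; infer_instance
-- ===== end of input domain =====

-- B deduplicates first and assigns digits by enumeration, then evaluates by divide-and-conquer
-- instead of A's per-position power sum: faster (measured).

-- ===== PORT A =====
-- first loop: builds maps with the threaded counter i (1, then 0, then 2, 3, …)
def timebaseBuild (cs : List Char) : Int × PySem.Dict Char Int :=
  cs.foldl (fun st c =>
    if st.2.contains c then st
    else (if st.1 == 1 then 0 else if st.1 == 0 then 2 else st.1 + 1, st.2.insert c st.1))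
    (1, PySem.Dict.empty)

def timebase (input : String) : Int :=
  let cs := input.toList
  let maps := (timebaseBuild cs).2
  let base : Int := if (maps.size : Int) = 1 then (maps.size : Int) + 1 else (maps.size : Int)
  -- for j in range(len(input)): sum += base ** (len-j-1) * maps[input[j]]  (key always present)
  (cs.zipIdx.foldl (fun s p => s + base ^ (cs.length - p.2 - 1) * ((maps.get? p.1).getD 0)) 0)

-- ===== PORT B =====
-- ev(lo,hi) on ds[lo:hi], ported structurally on the sublist: (value in base, base^length)
def timebaseEv (base : Int) (ds : List Int) : Int × Int :=
  match ds with
  | [] => (0, 1)          -- unreachable guard: Source B only calls ev on a nonempty slice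
  | [d] => (d, base)
  | a :: b :: t =>
    let m := (a :: b :: t).length / 2
    let l := timebaseEv base ((a :: b :: t).take m)
    let r := timebaseEv base ((a :: b :: t).drop m)
    (l.1 * r.2 + r.1, l.2 * r.2)
termination_by ds.length
decreasing_by
  · simp; omega
  · simp; omega

def timebase_alt (input : String) : Int :=
  let cs := input.toList
  let order := PySem.List.dedup cs
  -- dict comprehension over enumerate(order): insertion in enumeration order
  let digits := (PySem.List.enumerate order).foldl
    (fun d p => d.insert p.2 (if p.1 = 0 then (1 : Int) else if p.1 = 1 then 0 else p.1))
    PySem.Dict.empty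
  let base : Int := max 2 (order.length : Int)
  let ds := cs.map (fun c => (digits.get? c).getD 0)
  match ds with
  | [] => 0
  | _ => (timebaseEv base ds).1

-- ===== PRECONDITION & SPEC =====
def Spec_timebase (input : String) (out : Int) : Prop := out = timebase_alt input
instance (input : String) (out : Int) : Decidable (Spec_timebase input out) := by unfold Spec_timebase; infer_instance

-- ===== CLAIM (what is proved, stated in full; the proofs are below) =====
def Claim_equal_timebase : Prop := ∀ (input : String), Dom_timebase input → Spec_timebase input (timebase input)

-- ===== LEMMAS AND PROOFS =====

-- the counter i of A's first loop is a function of the dict's size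
def icode (n : Nat) : Int := if n = 0 then 1 else if n = 1 then 0 else (n : Int)

lemma build_eq (cs : List Char) (d : PySem.Dict Char Int) :
    cs.foldl (fun st c =>
      if st.2.contains c then st
      else (if st.1 == 1 then 0 else if st.1 == 0 then 2 else st.1 + 1, st.2.insert c st.1))
      (icode d.size, d)
    = (icode (cs.foldl (fun d c =>
        if d.contains c then d
        else d.insert c (icode d.size)) d).size,
       cs.foldl (fun d c =>
        if d.contains c then d
        else d.insert c (icode d.size)) d) := by
  induction cs generalizing d with
  | nil => rfl
  | cons c t ih =>
    simp only [List.foldl_cons]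
    by_cases h : d.contains c
    · simp only [h, if_true]
      exact ih d
    · have hsz : (d.insert c (icode d.size)).size = d.size + 1 := by
        rw [PySem.Dict.size_insert]; simp [h]
      have hnext : (if icode d.size == 1 then (0:Int) else if icode d.size == 0 then 2 else icode d.size + 1)
          = icode (d.size + 1) := by
        rcases hn : d.size with _ | _ | m
        · simp [icode]
        · simp [icode]
        · have h1 : icode (m + 1 + 1) = ((m + 2 : Nat) : Int) := by simp [icode]; omega
          have h2 : icode (m + 1 + 1 + 1) = ((m + 3 : Nat) : Int) := by simp [icode]; omega
          rw [h1, h2]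
          have e1 : (((m + 2 : Nat) : Int) == 1) = false := by simp; omega
          have e0 : (((m + 2 : Nat) : Int) == 0) = false := by simp; omega
          rw [e1, e0]
          push_cast; ring
      simp only [h, Bool.false_eq_true, if_false, hnext]
      rw [← hsz]
      exact ih (d.insert c (icode d.size))

-- B's dict built from enumerate(u)
def mkD (u : List Char) : PySem.Dict Char Int :=
  (PySem.List.enumerate u).foldl
    (fun d p => d.insert p.2 (if p.1 = 0 then (1 : Int) else if p.1 = 1 then 0 else p.1))
    PySem.Dict.empty

lemma mkD_keys (u : List Char) (hu : u.Nodup) : (mkD u).keys = u := by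
  unfold mkD
  rw [PySem.Dict.keys_foldl_insert_key]
  rw [PySem.Dict.keys_empty, PySem.List.map_snd_enumerate]
  have h0 : PySem.Set.update ([] : List Char) u = PySem.Set.ofList u := rfl
  rw [h0]
  exact PySem.Set.ofList_eq_self_of_nodup u hu

lemma mkD_snoc (u : List Char) (c : Char) :
    mkD (u ++ [c]) = (mkD u).insert c (icode u.length) := by
  unfold mkD
  rw [PySem.List.enumerate_append, List.foldl_append]
  simp only [PySem.List.enumerate_cons, PySem.List.enumerate_nil, List.foldl_cons, List.foldl_nil]
  congr 1
  unfold icode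
  rcases u.length with _ | _ | m
  · simp
  · simp
  · simp
    omega

-- A's conditional-insert loop, started from mkD u, lands on mkD (Set.update u cs)
lemma F_mk (cs : List Char) (u : List Char) (hu : u.Nodup) :
    cs.foldl (fun d c => if d.contains c then d else d.insert c (icode d.size)) (mkD u)
    = mkD (PySem.Set.update u cs) := by
  induction cs generalizing u with
  | nil => rfl
  | cons c t ih =>
    simp only [List.foldl_cons]
    have hk : (mkD u).contains c = decide (c ∈ u) := by
      rw [PySem.Dict.contains_eq_decide_mem_keys, mkD_keys u hu]
    have hupd : PySem.Set.update u (c :: t) = PySem.Set.update (PySem.Set.add u c) t := rfl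
    by_cases hc : c ∈ u
    · simp only [hk, hc, decide_true, if_true, hupd]
      have : PySem.Set.add u c = u := by simp [PySem.Set.add, PySem.Set.contains, hc]
      rw [this]; exact ih u hu
    · have hsz : (mkD u).size = u.length := by
        have : (mkD u).keys.length = u.length := by rw [mkD_keys u hu]
        simpa [PySem.Dict.keys] using this
      simp only [hk, hc, decide_false, Bool.false_eq_true, if_false, hsz, hupd]
      have hadd : PySem.Set.add u c = u ++ [c] := by
        simp [PySem.Set.add, PySem.Set.contains, hc]
      rw [hadd, ← mkD_snoc u c]
      exact ih (u ++ [c]) (by simp [List.nodup_append, hu]; intro a ha he; exact hc (he ▸ ha))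

-- Horner fold vs. power sum
def psum (base : Int) (f : Char → Int) : List Char → Int
  | [] => 0
  | c :: t => f c * base ^ t.length + psum base f t

lemma horner_eq (base : Int) (f : Char → Int) (l : List Char) (a : Int) :
    l.foldl (fun s c => s * base + f c) a = a * base ^ l.length + psum base f l := by
  induction l generalizing a with
  | nil => simp [psum]
  | cons c t ih =>
    simp only [List.foldl_cons, psum, List.length_cons, ih]
    ring

lemma powsum_eq (base : Int) (f : Char → Int) (n : Nat) (l : List Char) (k : Nat) (acc : Int)
    (h : k + l.length = n) :
    (l.zipIdx k).foldl (fun s p => s + base ^ (n - p.2 - 1) * f p.1) acc = acc + psum base f l := by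
  induction l generalizing k acc with
  | nil => simp [psum]
  | cons c t ih =>
    simp only [List.zipIdx_cons, List.foldl_cons, psum]
    rw [ih (k + 1) _ (by simp at h ⊢; omega)]
    have : n - k - 1 = t.length := by simp at h; omega
    rw [this]; ring

-- integer-horner fold over a list of digits
lemma hornerZ_eq (base : Int) (l : List Int) (a : Int) :
    l.foldl (fun s d => s * base + d) a
    = a * base ^ l.length + l.foldl (fun s d => s * base + d) 0 := by
  induction l generalizing a with
  | nil => simp
  | cons d t ih =>
    simp only [List.foldl_cons, List.length_cons]
    rw [ih (a * base + d), ih (0 * base + d)]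
    ring

-- the divide-and-conquer evaluator computes the Horner value and base^length
lemma ev_spec_aux (base : Int) : ∀ (n : Nat) (ds : List Int), ds.length ≤ n →
    timebaseEv base ds = (ds.foldl (fun s d => s * base + d) 0, base ^ ds.length) := by
  intro n
  induction n with
  | zero =>
    intro ds h
    have : ds = [] := List.eq_nil_of_length_eq_zero (by omega)
    subst this; simp [timebaseEv]
  | succ n ih =>
    intro ds h
    match ds with
    | [] => simp [timebaseEv]
    | [d] => simp [timebaseEv]
    | a :: b :: t =>
      rw [timebaseEv]
      have hm1 : ((a :: b :: t).take ((a :: b :: t).length / 2)).length ≤ n := by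
        simp at h ⊢; omega
      have hm2 : ((a :: b :: t).drop ((a :: b :: t).length / 2)).length ≤ n := by
        simp at h ⊢; omega
      rw [ih _ hm1, ih _ hm2]
      have hfold : (a :: b :: t).foldl (fun s d => s * base + d) 0
          = ((a :: b :: t).take ((a :: b :: t).length / 2)).foldl (fun s d => s * base + d) 0
              * base ^ ((a :: b :: t).drop ((a :: b :: t).length / 2)).length
            + ((a :: b :: t).drop ((a :: b :: t).length / 2)).foldl (fun s d => s * base + d) 0 := by
        conv_lhs => rw [← List.take_append_drop ((a :: b :: t).length / 2) (a :: b :: t)]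
        rw [List.foldl_append, hornerZ_eq]
      have hlen : ((a :: b :: t).take ((a :: b :: t).length / 2)).length
          + ((a :: b :: t).drop ((a :: b :: t).length / 2)).length = (a :: b :: t).length := by
        simp; omega
      rw [hfold, ← pow_add, hlen]

lemma ev_spec (base : Int) (ds : List Int) :
    timebaseEv base ds = (ds.foldl (fun s d => s * base + d) 0, base ^ ds.length) :=
  ev_spec_aux base ds.length ds le_rfl

-- ===== VERDICT (by name: the statement is the Claim_ definition above) =====
theorem timebase_spec : Claim_equal_timebase := by
  intro input _
  simp only [Spec_timebase, timebase, timebase_alt, timebaseBuild, PySem.List.dedup_eq_ofList]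
  have hb := build_eq input.toList PySem.Dict.empty
  rw [show icode (PySem.Dict.empty : PySem.Dict Char Int).size = 1 from rfl] at hb
  rw [hb]
  have hF := F_mk input.toList [] List.nodup_nil
  rw [show mkD [] = PySem.Dict.empty from rfl,
      show PySem.Set.update ([] : List Char) input.toList = PySem.Set.ofList input.toList from rfl] at hF
  rw [hF]
  rw [show (PySem.List.enumerate (PySem.Set.ofList input.toList)).foldl
      (fun d p => d.insert p.2 (if p.1 = 0 then (1 : Int) else if p.1 = 1 then 0 else p.1))
      PySem.Dict.empty = mkD (PySem.Set.ofList input.toList) from rfl]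
  generalize input.toList = cs
  cases cs with
  | nil => simp
  | cons c t =>
    have hnd : (PySem.Set.ofList (c :: t)).Nodup := PySem.Set.nodup_ofList _
    have hsz : (mkD (PySem.Set.ofList (c :: t))).size = (PySem.Set.ofList (c :: t)).length := by
      have hk : (mkD (PySem.Set.ofList (c :: t))).keys.length = (PySem.Set.ofList (c :: t)).length := by
        rw [mkD_keys _ hnd]
      simpa [PySem.Dict.keys] using hk
    have hlen1 : 1 ≤ (PySem.Set.ofList (c :: t)).length := by
      have hc : c ∈ PySem.Set.ofList (c :: t) := by
        rw [PySem.Set.mem_ofList]; exact List.mem_cons_self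
      exact List.length_pos_of_mem hc
    have hbase : (if ((mkD (PySem.Set.ofList (c :: t))).size : Int) = 1
          then ((mkD (PySem.Set.ofList (c :: t))).size : Int) + 1
          else ((mkD (PySem.Set.ofList (c :: t))).size : Int))
        = max 2 ((PySem.Set.ofList (c :: t)).length : Int) := by
      rw [hsz]
      split_ifs with h1
      · have h1' : (PySem.Set.ofList (c :: t)).length = 1 := by exact_mod_cast h1
        rw [h1']; rfl
      · have hle : (1 : Int) ≤ ((PySem.Set.ofList (c :: t)).length : Int) := by exact_mod_cast hlen1
        rw [max_eq_right (by omega)]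
    rw [hbase]
    rw [powsum_eq (max 2 ((PySem.Set.ofList (c :: t)).length : Int))
        (fun x => ((mkD (PySem.Set.ofList (c :: t))).get? x).getD 0)
        (c :: t).length (c :: t) 0 0 (by simp)]
    simp only [List.map_cons]
    rw [ev_spec]
    rw [show (((mkD (PySem.Set.ofList (c :: t))).get? c).getD 0 ::
          t.map fun x => ((mkD (PySem.Set.ofList (c :: t))).get? x).getD 0 : List Int)
        = (c :: t).map (fun x => ((mkD (PySem.Set.ofList (c :: t))).get? x).getD 0) from rfl]
    rw [List.foldl_map]
    rw [horner_eq]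
    simp
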